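-- pv_equiv track=rewrite | github.com/mainakaruoya/py_rijndael | rijndael.py | xTimesGreaterThanTwo
-- ===== SOURCE A (Python) =====
-- def xTimes(listEntry: int, multiplier: int) -> bytes:
--
--     if multiplier == 2 and listEntry & 0x80:
--         byte = listEntry << 1
--         byte ^= 0x1b
--         byte &= 0xff
--         return byte
--     elif multiplier == 2:
--         byte = listEntry << 1
--         byte &= 0xff
--         return byte
--     else:
--         return listEntry
--
-- def xTimesGreaterThanTwo(listEntry: int, multiplier: int) -> int:
--     if multiplier == 3:  # {03}
--         return listEntry ^ xTimes(listEntry, 2)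
--
--     if multiplier == 8:  # {08}
--         return xTimes(xTimes(xTimes(listEntry, 2), 2), 2)
--
--     if multiplier == 9:  # {09}
--         return listEntry ^ xTimesGreaterThanTwo(listEntry, 8)
--
--     if multiplier == 11:  # {0b}
--         return (xTimesGreaterThanTwo(listEntry, 8)) ^ xTimes(listEntry, 2) ^ listEntry
--
--     if multiplier == 13:  # {0d}
--         return xTimesGreaterThanTwo(listEntry, 8) ^ xTimes((xTimes(listEntry, 2)), 2) ^ listEntry
--
--     if multiplier == 14:  # {0e}
--         return xTimesGreaterThanTwo(listEntry, 8) ^ xTimes((xTimes(listEntry, 2)), 2) ^ xTimes(listEntry, 2)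
--
--     return listEntry
-- ===== SOURCE B (Python) =====
-- def xstep(a):
--     # one GF(2^8) doubling step (xtime)
--     return ((a << 1) ^ 0x1b) & 0xff if a & 0x80 else (a << 1) & 0xff
--
-- def gfmul(a, m):
--     # Russian-peasant GF(2^8) multiply, recursing over the bits of m.
--     if m <= 0:
--         return 0
--     low = a if m & 1 else 0
--     return low ^ gfmul(xstep(a), m // 2)
--
-- def xTimesGreaterThanTwo(listEntry, multiplier):
--     if multiplier in (3, 8, 9, 11, 13, 14):
--         return gfmul(listEntry, multiplier)
--     return listEntry
-- ===== Notes on version B (the rewrite author's own statement) =====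
-- stated objective: alternative
-- what changed: Replaces A's hand-unrolled per-multiplier XOR formulas and self-recursion with a single generic russian-peasant GF(2^8) multiply that recurses over the bits of the multiplier, guarded by the same supported-multiplier set.
import Mathlib
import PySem

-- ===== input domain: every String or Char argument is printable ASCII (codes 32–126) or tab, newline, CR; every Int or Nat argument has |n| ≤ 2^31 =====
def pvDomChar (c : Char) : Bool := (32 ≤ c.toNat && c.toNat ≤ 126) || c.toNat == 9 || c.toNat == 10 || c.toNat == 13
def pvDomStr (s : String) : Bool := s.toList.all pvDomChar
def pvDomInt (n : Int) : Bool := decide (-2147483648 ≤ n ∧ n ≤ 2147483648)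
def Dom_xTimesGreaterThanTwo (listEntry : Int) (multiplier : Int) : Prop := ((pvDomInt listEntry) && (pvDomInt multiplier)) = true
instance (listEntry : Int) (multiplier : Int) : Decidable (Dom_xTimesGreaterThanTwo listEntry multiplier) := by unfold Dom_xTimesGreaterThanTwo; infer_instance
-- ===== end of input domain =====

-- B replaces A's hand-unrolled per-multiplier XOR formulas with one generic
-- russian-peasant GF(2^8) multiply over the bits of the multiplier (alternative, same cost).


-- ===== PORT A =====
def xTimes (listEntry : Int) (multiplier : Int) : Int :=
  if multiplier = 2 ∧ PySem.Int.band listEntry 128 ≠ 0 then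
    PySem.Int.band (PySem.Int.bxor (listEntry <<< (1 : Nat)) 27) 255
  else if multiplier = 2 then
    PySem.Int.band (listEntry <<< (1 : Nat)) 255
  else
    listEntry

def xTimesGreaterThanTwo (listEntry : Int) (multiplier : Int) : Int :=
  if multiplier = 3 then
    PySem.Int.bxor listEntry (xTimes listEntry 2)
  else if multiplier = 8 then
    xTimes (xTimes (xTimes listEntry 2) 2) 2
  else if _h9 : multiplier = 9 then
    PySem.Int.bxor listEntry (xTimesGreaterThanTwo listEntry 8)
  else if _h11 : multiplier = 11 then
    PySem.Int.bxor (PySem.Int.bxor (xTimesGreaterThanTwo listEntry 8) (xTimes listEntry 2)) listEntry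
  else if _h13 : multiplier = 13 then
    PySem.Int.bxor (PySem.Int.bxor (xTimesGreaterThanTwo listEntry 8) (xTimes (xTimes listEntry 2) 2)) listEntry
  else if _h14 : multiplier = 14 then
    PySem.Int.bxor (PySem.Int.bxor (xTimesGreaterThanTwo listEntry 8) (xTimes (xTimes listEntry 2) 2)) (xTimes listEntry 2)
  else
    listEntry
termination_by multiplier.toNat
decreasing_by all_goals omega

-- ===== PORT B =====
def xstep (a : Int) : Int :=
  if PySem.Int.band a 128 ≠ 0 then
    PySem.Int.band (PySem.Int.bxor (a <<< (1 : Nat)) 27) 255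
  else
    PySem.Int.band (a <<< (1 : Nat)) 255

def gfmul (a : Int) (m : Int) : Int :=
  if m ≤ 0 then 0
  else
    let low := if PySem.Int.band m 1 ≠ 0 then a else 0
    PySem.Int.bxor low (gfmul (xstep a) (PySem.Int.floordiv m 2))
termination_by m.toNat
decreasing_by
  simp only [PySem.Int.floordiv] at *
  rw [Int.fdiv_eq_ediv]
  omega

def xTimesGreaterThanTwo_alt (listEntry : Int) (multiplier : Int) : Int :=
  if multiplier = 3 ∨ multiplier = 8 ∨ multiplier = 9 ∨ multiplier = 11 ∨ multiplier = 13 ∨ multiplier = 14 then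
    gfmul listEntry multiplier
  else
    listEntry

-- ===== PRECONDITION & SPEC =====
def Spec_xTimesGreaterThanTwo (listEntry : Int) (multiplier : Int) (out : Int) : Prop := out = xTimesGreaterThanTwo_alt listEntry multiplier
instance (listEntry : Int) (multiplier : Int) (out : Int) : Decidable (Spec_xTimesGreaterThanTwo listEntry multiplier out) := by unfold Spec_xTimesGreaterThanTwo; infer_instance

-- ===== CLAIM (what is proved, stated in full; the proofs are below) =====
def Claim_equal_xTimesGreaterThanTwo : Prop := ∀ (listEntry : Int) (multiplier : Int), Dom_xTimesGreaterThanTwo listEntry multiplier → Spec_xTimesGreaterThanTwo listEntry multiplier (xTimesGreaterThanTwo listEntry multiplier)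

-- ===== LEMMAS AND PROOFS =====
theorem bxor_eq_xor (a b : Int) : PySem.Int.bxor a b = Int.xor a b := by
  cases a <;> cases b <;> simp [PySem.Int.bxor, Int.xor, Int.negSucc_eq] <;> omega

theorem ixor_comm (a b : Int) : Int.xor a b = Int.xor b a := by
  cases a <;> cases b <;> simp [Int.xor, Nat.xor_comm]

theorem ixor_zero (a : Int) : Int.xor a 0 = a := by
  cases a <;> simp [Int.xor]

theorem zero_ixor (a : Int) : Int.xor 0 a = a := by
  cases a <;> simp [Int.xor]

theorem xTimes_two (a : Int) : xTimes a 2 = xstep a := by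
  unfold xTimes xstep
  by_cases h : PySem.Int.band a 128 ≠ 0 <;> simp [h]

theorem gfmul_pos (a m : Int) (h : 0 < m) :
    gfmul a m = PySem.Int.bxor (if PySem.Int.band m 1 ≠ 0 then a else 0)
      (gfmul (xstep a) (PySem.Int.floordiv m 2)) := by
  conv_lhs => unfold gfmul
  simp [not_le.mpr h]

theorem gfmul_zero (a : Int) : gfmul a 0 = 0 := by
  conv_lhs => unfold gfmul
  simp

theorem gfmul_3 (a : Int) : gfmul a 3 = Int.xor a (xstep a) := by
  rw [gfmul_pos _ 3 (by norm_num),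
      show PySem.Int.floordiv 3 2 = 1 from by decide,
      gfmul_pos _ 1 (by norm_num),
      show PySem.Int.floordiv 1 2 = 0 from by decide,
      gfmul_zero]
  simp [show PySem.Int.band 3 1 = 1 from by decide, bxor_eq_xor, ixor_zero]

theorem gfmul_8 (a : Int) : gfmul a 8 = xstep (xstep (xstep a)) := by
  rw [gfmul_pos _ 8 (by norm_num),
      show PySem.Int.floordiv 8 2 = 4 from by decide,
      gfmul_pos _ 4 (by norm_num),
      show PySem.Int.floordiv 4 2 = 2 from by decide,
      gfmul_pos _ 2 (by norm_num),
      show PySem.Int.floordiv 2 2 = 1 from by decide,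
      gfmul_pos _ 1 (by norm_num),
      show PySem.Int.floordiv 1 2 = 0 from by decide,
      gfmul_zero]
  simp [show PySem.Int.band 8 1 = 0 from by decide, show PySem.Int.band 4 1 = 0 from by decide, show PySem.Int.band 2 1 = 0 from by decide,
        bxor_eq_xor, ixor_zero, zero_ixor]

theorem gfmul_9 (a : Int) : gfmul a 9 = Int.xor a (xstep (xstep (xstep a))) := by
  rw [gfmul_pos _ 9 (by norm_num),
      show PySem.Int.floordiv 9 2 = 4 from by decide,
      gfmul_pos _ 4 (by norm_num),
      show PySem.Int.floordiv 4 2 = 2 from by decide,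
      gfmul_pos _ 2 (by norm_num),
      show PySem.Int.floordiv 2 2 = 1 from by decide,
      gfmul_pos _ 1 (by norm_num),
      show PySem.Int.floordiv 1 2 = 0 from by decide,
      gfmul_zero]
  simp [show PySem.Int.band 9 1 = 1 from by decide, show PySem.Int.band 4 1 = 0 from by decide, show PySem.Int.band 2 1 = 0 from by decide,
        bxor_eq_xor, ixor_zero, zero_ixor]

theorem gfmul_11 (a : Int) : gfmul a 11 = Int.xor a (Int.xor (xstep a) (xstep (xstep (xstep a)))) := by
  rw [gfmul_pos _ 11 (by norm_num),
      show PySem.Int.floordiv 11 2 = 5 from by decide,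
      gfmul_pos _ 5 (by norm_num),
      show PySem.Int.floordiv 5 2 = 2 from by decide,
      gfmul_pos _ 2 (by norm_num),
      show PySem.Int.floordiv 2 2 = 1 from by decide,
      gfmul_pos _ 1 (by norm_num),
      show PySem.Int.floordiv 1 2 = 0 from by decide,
      gfmul_zero]
  simp [show PySem.Int.band 11 1 = 1 from by decide, show PySem.Int.band 5 1 = 1 from by decide, show PySem.Int.band 2 1 = 0 from by decide,
        bxor_eq_xor, ixor_zero, zero_ixor]

theorem gfmul_13 (a : Int) : gfmul a 13 = Int.xor a (Int.xor (xstep (xstep a)) (xstep (xstep (xstep a)))) := by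
  rw [gfmul_pos _ 13 (by norm_num),
      show PySem.Int.floordiv 13 2 = 6 from by decide,
      gfmul_pos _ 6 (by norm_num),
      show PySem.Int.floordiv 6 2 = 3 from by decide,
      gfmul_pos _ 3 (by norm_num),
      show PySem.Int.floordiv 3 2 = 1 from by decide,
      gfmul_pos _ 1 (by norm_num),
      show PySem.Int.floordiv 1 2 = 0 from by decide,
      gfmul_zero]
  simp [show PySem.Int.band 13 1 = 1 from by decide, show PySem.Int.band 6 1 = 0 from by decide, show PySem.Int.band 3 1 = 1 from by decide,
        bxor_eq_xor, ixor_zero, zero_ixor]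

theorem gfmul_14 (a : Int) : gfmul a 14 = Int.xor (xstep a) (Int.xor (xstep (xstep a)) (xstep (xstep (xstep a)))) := by
  rw [gfmul_pos _ 14 (by norm_num),
      show PySem.Int.floordiv 14 2 = 7 from by decide,
      gfmul_pos _ 7 (by norm_num),
      show PySem.Int.floordiv 7 2 = 3 from by decide,
      gfmul_pos _ 3 (by norm_num),
      show PySem.Int.floordiv 3 2 = 1 from by decide,
      gfmul_pos _ 1 (by norm_num),
      show PySem.Int.floordiv 1 2 = 0 from by decide,
      gfmul_zero]
  simp [show PySem.Int.band 14 1 = 0 from by decide, show PySem.Int.band 7 1 = 1 from by decide, show PySem.Int.band 3 1 = 1 from by decide,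
        bxor_eq_xor, ixor_zero, zero_ixor]

theorem xtgt2_8 (a : Int) : xTimesGreaterThanTwo a 8 = xstep (xstep (xstep a)) := by
  rw [xTimesGreaterThanTwo]
  simp [xTimes_two]

-- ===== VERDICT (by name: the statement is the Claim_ definition above) =====
theorem xTimesGreaterThanTwo_spec : Claim_equal_xTimesGreaterThanTwo := by
  intro l m _
  unfold Spec_xTimesGreaterThanTwo xTimesGreaterThanTwo_alt
  rw [xTimesGreaterThanTwo]
  by_cases h3 : m = 3
  · simp [h3, gfmul_3, xTimes_two, bxor_eq_xor]
  by_cases h8 : m = 8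
  · simp [h8, gfmul_8, xTimes_two]
  by_cases h9 : m = 9
  · simp [h9, gfmul_9, xtgt2_8, bxor_eq_xor]
  by_cases h11 : m = 11
  · simp [h11, gfmul_11, xtgt2_8, xTimes_two, bxor_eq_xor]
    simp [ixor_comm]
  by_cases h13 : m = 13
  · simp [h13, gfmul_13, xtgt2_8, xTimes_two, bxor_eq_xor]
    simp [ixor_comm]
  by_cases h14 : m = 14
  · simp [h14, gfmul_14, xtgt2_8, xTimes_two, bxor_eq_xor]
    simp [ixor_comm]
  · simp [h3, h8, h9, h11, h13, h14]
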